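-- pv_equiv track=rewrite | github.com/VaHiX/CodeForces | Python/ByRound/2164/2164_F1_Chain_Prefix_Rank_Easy_Version.py | alge
-- ===== SOURCE A (Python) =====
-- def alge(a, b):
--     if b == 0:
--         return 1, 0
--     if a < b:
--         c, d = alge(b, a)
--         return d, c
--     if a % b == 0:
--         return 1, -(a // b - 1)
--     c, d = alge(b, a % b)
--     return d, c - a // b * d
-- ===== SOURCE B (Python) =====
-- def alge(a, b):
--     # Iterative: accumulate a 2x2 matrix over the Euclid quotients instead of recursing.
--     m00, m01, m10, m11 = 1, 0, 0, 1
--     while True: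
--         if b == 0:
--             x, y = 1, 0
--             break
--         if a < b:
--             m00, m01, m10, m11 = m01, m00, m11, m10
--             a, b = b, a
--             continue
--         q = a // b
--         if a % b == 0:
--             x, y = 1, -(q - 1)
--             break
--         m00, m01, m10, m11 = m01, m00 - q * m01, m11, m10 - q * m11
--         a, b = b, a % b
--     return m00 * x + m01 * y, m10 * x + m11 * y
-- ===== Notes on version B (the rewrite author's own statement) =====
-- stated objective: alternative
-- what changed: Replaced A's top-down recursion (which combines results on the way back up) by a single iterative loop that accumulates a 2x2 coefficient matrix over the Euclid quotients and applies it to the base pair at the end.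
import Mathlib
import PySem

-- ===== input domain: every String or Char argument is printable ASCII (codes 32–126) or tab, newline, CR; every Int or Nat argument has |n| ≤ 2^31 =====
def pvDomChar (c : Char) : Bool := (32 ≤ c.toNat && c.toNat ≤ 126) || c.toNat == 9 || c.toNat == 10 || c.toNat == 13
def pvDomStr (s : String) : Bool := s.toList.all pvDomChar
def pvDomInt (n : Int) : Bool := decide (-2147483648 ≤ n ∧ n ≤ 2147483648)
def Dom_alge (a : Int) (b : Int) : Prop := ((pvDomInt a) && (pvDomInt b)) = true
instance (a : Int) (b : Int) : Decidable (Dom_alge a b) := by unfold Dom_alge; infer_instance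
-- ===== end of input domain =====

-- B replaces A's top-down recursion by an explicit loop accumulating a 2x2 matrix (alternative decomposition; return value only).

-- ===== PORT A =====
-- Fuel only makes A's recursion total; on every input satisfying Pre_alge the fuel is ample
-- (the recursion depth there is at most |a|+|b|+2), so the guard branch is never reached.
def algeF : Nat → Int → Int → Int × Int
  | 0, _, _ => (0, 0)
  | n+1, a, b =>
    if b = 0 then (1, 0)
    else if a < b then
      let p := algeF n b a
      (p.2, p.1)
    else if PySem.Int.mod a b = 0 then (1, -(PySem.Int.floordiv a b - 1))
    else
      let p := algeF n b (PySem.Int.mod a b)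
      (p.2, p.1 - PySem.Int.floordiv a b * p.2)

def alge (a : Int) (b : Int) : Int × Int := algeF (a.natAbs + b.natAbs + 2) a b

-- ===== PORT B =====
-- The while-True loop of Source B, with the same totality fuel; state = matrix (m00,m01,m10,m11) and (a,b).
def algeLoop : Nat → Int → Int → Int → Int → Int → Int → Int × Int
  | 0, _, _, _, _, _, _ => (0, 0)
  | n+1, m00, m01, m10, m11, a, b =>
    if b = 0 then
      let x : Int := 1; let y : Int := 0
      (m00 * x + m01 * y, m10 * x + m11 * y)
    else if a < b then
      algeLoop n m01 m00 m11 m10 b a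
    else
      let q := PySem.Int.floordiv a b
      if PySem.Int.mod a b = 0 then
        let x : Int := 1; let y : Int := -(q - 1)
        (m00 * x + m01 * y, m10 * x + m11 * y)
      else
        algeLoop n m01 (m00 - q * m01) m11 (m10 - q * m11) b (PySem.Int.mod a b)

def alge_alt (a : Int) (b : Int) : Int × Int := algeLoop (a.natAbs + b.natAbs + 2) 1 0 0 1 a b

-- ===== PRECONDITION & SPEC =====
-- Pre_ excludes exactly the inputs on which A's recursion never terminates (Python raises
-- RecursionError there): a negative "smaller" argument that does not divide the other.
def Pre_alge (a : Int) (b : Int) : Prop :=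
  if a < b then (0 ≤ a ∨ a ∣ b) else (b = 0 ∨ 0 < b ∨ b ∣ a)
instance (a : Int) (b : Int) : Decidable (Pre_alge a b) := by unfold Pre_alge; infer_instance
def pvWitness_alge : Int × Int := (21, 13)
def Spec_alge (a : Int) (b : Int) (out : Int × Int) : Prop := out = alge_alt a b
instance (a : Int) (b : Int) (out : Int × Int) : Decidable (Spec_alge a b out) := by unfold Spec_alge; infer_instance

-- ===== CLAIM (what is proved, stated in full; the proofs are below) =====
def Claim_equal_alge : Prop := ∀ (a : Int) (b : Int), Dom_alge a b → Pre_alge a b → Spec_alge a b (alge a b)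

-- ===== LEMMAS AND PROOFS =====
-- The loop applied from matrix M equals M applied to A's recursive value, fuel for fuel
-- (at fuel 0 both sides are (0,0) since M·(0,0) = (0,0)).
theorem algeLoop_eq (n : Nat) : ∀ (m00 m01 m10 m11 a b : Int),
    algeLoop n m00 m01 m10 m11 a b =
      (m00 * (algeF n a b).1 + m01 * (algeF n a b).2,
       m10 * (algeF n a b).1 + m11 * (algeF n a b).2) := by
  induction n with
  | zero => intro m00 m01 m10 m11 a b; simp [algeLoop, algeF]
  | succ n ih =>
    intro m00 m01 m10 m11 a b
    simp only [algeLoop, algeF]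
    split_ifs with h1 h2 h3
    · rfl
    · rw [ih]; ring_nf
    · rfl
    · rw [ih]; ring_nf

-- ===== VERDICT (by name: the statement is the Claim_ definition above) =====
theorem alge_spec : Claim_equal_alge := by
  intro a b _ _
  unfold Spec_alge alge alge_alt
  rw [algeLoop_eq]
  simp
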